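-- pv_equiv track=rewrite | github.com/maximeusdin/friday | scripts/format_component_analysis.py | parse_sql_output
-- ===== SOURCE A (Python) =====
-- def parse_sql_output(text):
--     """Parse SQL output into structured data."""
--     lines = text.strip().split('\n')
--
--     # Find the three result sets
--     sections = []
--     current_section = []
--
--     for line in lines:
--         if line.strip() and not line.startswith('(') and '|' in line:
--             if 'run_id' in line or 'query_text' in line:
--                 if current_section:
--                     sections.append(current_section)
--                 current_section = [line]
--             elif current_section:
--                 current_section.append(line)
--
--     if current_section:
--         sections.append(current_section)
--
--     return sections
-- ===== SOURCE B (Python) =====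
-- def parse_sql_output(text):
--     """Parse SQL output into structured data."""
--     def relevant(ln):
--         return ln.strip() and not ln.startswith('(') and '|' in ln
--
--     def header(ln):
--         return 'run_id' in ln or 'query_text' in ln
--
--     def span(pred, ls):
--         # longest prefix of ls whose elements satisfy pred, and the remainder
--         i = 0
--         while i < len(ls) and pred(ls[i]):
--             i += 1
--         return ls[:i], ls[i:]
--
--     lines = [ln for ln in text.strip().split('\n') if relevant(ln)]
--     sections = []
--     _, rest = span(lambda ln: not header(ln), lines)  # drop lines before the first header
--     while rest:
--         body, tail = span(lambda ln: not header(ln), rest[1:])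
--         sections.append([rest[0]] + body)
--         rest = tail
--     return sections
-- ===== Notes on version B (the rewrite author's own statement) =====
-- stated objective: alternative
-- what changed: A groups lines in one pass with a (sections, current_section) buffer and a final flush; B first filters the relevant lines, drops everything before the first header with span, and then repeatedly splits off one whole section at a time (header plus the prefix of non-header lines) with span.
import Mathlib
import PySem

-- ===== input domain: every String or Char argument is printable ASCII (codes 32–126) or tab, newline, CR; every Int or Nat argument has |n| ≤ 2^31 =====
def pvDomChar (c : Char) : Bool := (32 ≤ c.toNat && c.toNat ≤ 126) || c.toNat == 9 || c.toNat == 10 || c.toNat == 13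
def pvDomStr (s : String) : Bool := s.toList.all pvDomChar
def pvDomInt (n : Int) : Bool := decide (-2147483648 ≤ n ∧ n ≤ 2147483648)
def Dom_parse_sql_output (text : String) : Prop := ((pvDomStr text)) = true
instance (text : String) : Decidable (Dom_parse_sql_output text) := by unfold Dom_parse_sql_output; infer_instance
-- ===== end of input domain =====

-- B replaces A's per-line buffer/flush accumulator with: filter the relevant lines once, then
-- repeatedly split off a whole section with span (prefix up to the next header); same return value.

-- ===== PORT A =====
-- literal transliteration: one pass over the lines with (sections, current_section) state, then a final flush
def parse_sql_output (text : String) : List (List String) :=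
  let lines := (PySem.Chars.splitOn (PySem.Str.strip text).toList ['\n']).map String.mk
  let st := List.foldl (fun (st : List (List String) × List String) line =>
    if PySem.Str.strip line != "" && !(PySem.Str.startswith line "(") && PySem.Str.isIn "|" line then
      if PySem.Str.isIn "run_id" line || PySem.Str.isIn "query_text" line then
        ((if st.2 ≠ [] then st.1 ++ [st.2] else st.1), [line])
      else if st.2 ≠ [] then (st.1, st.2 ++ [line])
      else st
    else st) ([], []) lines
  if st.2 ≠ [] then st.1 ++ [st.2] else st.1

-- ===== PORT B =====
def pvRelevant (ln : String) : Bool :=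
  PySem.Str.strip ln != "" && !(PySem.Str.startswith ln "(") && PySem.Str.isIn "|" ln

def pvHeader (ln : String) : Bool :=
  PySem.Str.isIn "run_id" ln || PySem.Str.isIn "query_text" ln

-- Source B's span: its index loop computes the length i of the maximal prefix satisfying pred,
-- so ls[:i] is takeWhile pred and ls[i:] is dropWhile pred (exact).
def pvSpan (pred : String → Bool) (ls : List String) : List String × List String :=
  (ls.takeWhile pred, ls.dropWhile pred)

-- Source B's 'while rest:' loop, as the obvious recursion on rest
def pvChunks (rest : List String) : List (List String) :=
  match rest with
  | [] => []
  | hd :: tl =>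
    ([hd] ++ (pvSpan (fun ln => !pvHeader ln) tl).1) ::
      pvChunks (pvSpan (fun ln => !pvHeader ln) tl).2
  termination_by rest.length
  decreasing_by
    simp only [pvSpan]
    exact Nat.lt_succ_of_le (List.length_dropWhile_le _ _)

def parse_sql_output_alt (text : String) : List (List String) :=
  let lines := ((PySem.Chars.splitOn (PySem.Str.strip text).toList ['\n']).map String.mk).filter pvRelevant
  pvChunks (pvSpan (fun ln => !pvHeader ln) lines).2

-- ===== PRECONDITION & SPEC =====
def Spec_parse_sql_output (text : String) (out : List (List String)) : Prop := out = parse_sql_output_alt text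
instance (text : String) (out : List (List String)) : Decidable (Spec_parse_sql_output text out) := by unfold Spec_parse_sql_output; infer_instance

-- ===== CLAIM (what is proved, stated in full; the proofs are below) =====
def Claim_equal_parse_sql_output : Prop := ∀ (text : String), Dom_parse_sql_output text → Spec_parse_sql_output text (parse_sql_output text)

-- ===== LEMMAS AND PROOFS =====

-- A's step over an already-relevant line
def pvStepRel (st : List (List String) × List String) (line : String) : List (List String) × List String :=
  if pvHeader line then ((if st.2 ≠ [] then st.1 ++ [st.2] else st.1), [line])
  else if st.2 ≠ [] then (st.1, st.2 ++ [line])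
  else st

lemma pvChunks_nil : pvChunks [] = [] := by rw [pvChunks.eq_def]

lemma pvChunks_cons (hd : String) (tl : List String) :
    pvChunks (hd :: tl) =
      (hd :: tl.takeWhile (fun ln => !pvHeader ln)) ::
        pvChunks (tl.dropWhile (fun ln => !pvHeader ln)) := by
  rw [pvChunks.eq_def]; simp [pvSpan]

-- the loop invariant: flushing the fold over any remaining relevant lines gives B's span-chunking
lemma pvFold_eq_chunks (ls : List String) :
    ∀ (sections : List (List String)) (cur : List String),
      (fun st : List (List String) × List String =>
        if st.2 ≠ [] then st.1 ++ [st.2] else st.1) (List.foldl pvStepRel (sections, cur) ls) =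
      sections ++
        (if cur = [] then pvChunks (ls.dropWhile (fun ln => !pvHeader ln))
         else (cur ++ ls.takeWhile (fun ln => !pvHeader ln)) ::
                pvChunks (ls.dropWhile (fun ln => !pvHeader ln))) := by
  induction ls with
  | nil =>
    intro sections cur
    by_cases hc : cur = [] <;> simp [hc, pvChunks_nil]
  | cons ln rest ih =>
    intro sections cur
    by_cases hh : pvHeader ln
    · have hstep : List.foldl pvStepRel (sections, cur) (ln :: rest) =
          List.foldl pvStepRel ((if cur ≠ [] then sections ++ [cur] else sections), [ln]) rest := by
        simp [List.foldl_cons, pvStepRel, hh]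
      rw [hstep, ih]
      by_cases hc : cur = [] <;>
        simp [hc, hh, pvChunks_cons]
    · by_cases hc : cur = []
      · have hstep : List.foldl pvStepRel (sections, cur) (ln :: rest) =
            List.foldl pvStepRel (sections, cur) rest := by
          simp [List.foldl_cons, pvStepRel, hh, hc]
        rw [hstep, ih]
        simp [hc, hh]
      · have hstep : List.foldl pvStepRel (sections, cur) (ln :: rest) =
            List.foldl pvStepRel (sections, cur ++ [ln]) rest := by
          simp [List.foldl_cons, pvStepRel, hh, hc]
        rw [hstep, ih]
        simp [hc, hh]

-- ===== VERDICT (by name: the statement is the Claim_ definition above) =====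
theorem parse_sql_output_spec : Claim_equal_parse_sql_output := by
  intro text _
  unfold Spec_parse_sql_output parse_sql_output parse_sql_output_alt
  show (let st := List.foldl (fun st line => if pvRelevant line then pvStepRel st line else st)
          ([], []) (List.map String.mk (PySem.Chars.splitOn (PySem.Str.strip text).toList ['\n']))
        if st.2 ≠ [] then st.1 ++ [st.2] else st.1)
      = pvChunks (pvSpan (fun ln => !pvHeader ln)
          (List.filter pvRelevant
            (List.map String.mk (PySem.Chars.splitOn (PySem.Str.strip text).toList ['\n'])))).2
  rw [← List.foldl_filter]
  have h := pvFold_eq_chunks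
    (List.filter pvRelevant
      (List.map String.mk (PySem.Chars.splitOn (PySem.Str.strip text).toList ['\n']))) [] []
  simpa [pvSpan] using h
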